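-- pv_equiv track=rewrite | github.com/pypi-data/pypi-mirror-371 | packages/urarovite/urarovite-1.3.1.tar.gz/urarovite-1.3.1/urarovite/validators/no_correct_answers.py | _detect_repetitive_patterns
-- ===== SOURCE A (Python) =====
-- from typing import Any, Dict, List, Union
--
-- def _detect_repetitive_patterns(data: List[List[Any]]) -> List[str]:
--     """Detect repetitive patterns that suggest template content.
--
--     Args:
--         data: 2D list of cell values
--
--     Returns:
--         List of detected repetitive patterns
--     """
--     patterns = []
--
--     # Check for repeated rows
--     if len(data) > 3:
--         row_patterns = {}
--         for i, row in enumerate(data[1:], 1):  # Skip header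
--             row_key = tuple(str(cell).strip() if cell else "" for cell in row)
--             if row_key in row_patterns:
--                 row_patterns[row_key].append(i)
--             else:
--                 row_patterns[row_key] = [i]
--
--         # Find rows that appear multiple times
--         for row_key, positions in row_patterns.items():
--             if len(positions) > 1:
--                 patterns.append(f"Repeated row at positions {positions}")
--
--     # Check for repeated columns
--     if len(data) > 0 and len(data[0]) > 3:
--         for col_idx in range(len(data[0])):
--             col_values = [
--                 str(row[col_idx]).strip()
--                 if col_idx < len(row) and row[col_idx]
--                 else ""
--                 for row in data
--             ]
--             if (
--                 len(set(col_values)) <= 2 and len(col_values) > 2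
--             ):  # Only 1-2 unique values
--                 patterns.append(f"Column {col_idx + 1} has repetitive content")
--
--     return patterns
-- ===== SOURCE B (Python) =====
-- from typing import Any, Dict, List, Union
--
-- def _detect_repetitive_patterns(data):
--     patterns = []
--
--     # Repeated rows: no grouping dict; one 'seen' set of keys, and for each
--     # first-occurrence key a forward rescan collects its positions.
--     if len(data) > 3:
--         keys = [
--             tuple(str(cell).strip() if cell else "" for cell in row)
--             for row in data[1:]
--         ]
--         seen = set()
--         for key in keys:
--             if key not in seen:
--                 positions = [j for j, k in enumerate(keys, 1) if k == key]
--                 if len(positions) > 1: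
--                     patterns.append(f"Repeated row at positions {positions}")
--                 seen.add(key)
--
--     # Low-variety columns: a single row-major pass maintaining, per column, a
--     # saturating tracker of at most 3 distinct values (never the full column).
--     if len(data) > 0 and len(data[0]) > 3:
--         ncols = len(data[0])
--         trackers = [[] for _ in range(ncols)]
--         for row in data:
--             for c in range(ncols):
--                 v = str(row[c]).strip() if c < len(row) and row[c] else ""
--                 t = trackers[c]
--                 if len(t) < 3 and v not in t:
--                     t.append(v)
--         for c in range(ncols):
--             if len(trackers[c]) <= 2 and len(data) > 2:
--                 patterns.append(f"Column {c + 1} has repetitive content")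
--
--     return patterns
-- ===== Notes on version B (the rewrite author's own statement) =====
-- stated objective: alternative
-- what changed: Row duplicates are reported without any grouping structure: a single 'seen' set plus a forward rescan collecting positions at each key's first occurrence; low-variety columns are judged in one row-major pass that keeps, per column, only a saturating tracker of at most 3 distinct values instead of rebuilding each full column and taking its set.
import Mathlib
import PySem

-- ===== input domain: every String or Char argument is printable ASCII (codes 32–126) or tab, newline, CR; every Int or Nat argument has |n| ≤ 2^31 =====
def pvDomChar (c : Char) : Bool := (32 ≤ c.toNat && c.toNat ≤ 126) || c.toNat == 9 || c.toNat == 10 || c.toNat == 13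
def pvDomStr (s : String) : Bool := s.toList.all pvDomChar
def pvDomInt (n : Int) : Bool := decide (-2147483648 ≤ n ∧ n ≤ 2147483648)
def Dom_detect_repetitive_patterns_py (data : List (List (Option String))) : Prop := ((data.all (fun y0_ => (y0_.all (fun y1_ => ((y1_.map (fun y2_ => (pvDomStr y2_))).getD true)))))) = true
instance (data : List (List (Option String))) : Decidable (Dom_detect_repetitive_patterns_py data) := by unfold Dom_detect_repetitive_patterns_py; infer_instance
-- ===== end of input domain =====

-- B drops A's grouping dict for the rows (a 'seen' set plus a forward rescan per first
-- occurrence) and A's per-column full value lists (one row-major pass keeping at most 3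
-- distinct values per column); objective: alternative — same return value, no speed claim.

-- `str(cell).strip() if cell else ""` for one cell (cell falsy ⟺ None or "")
def pvNorm (cell : Option String) : String :=
  match cell with
  | none => ""
  | some s => if s = "" then "" else PySem.Str.strip s

-- normalized row key: `tuple(str(cell).strip() if cell else "" for cell in row)`
def pvRowKey (row : List (Option String)) : List String := row.map pvNorm

-- `str(row[c]).strip() if c < len(row) and row[c] else ""`
def pvColNorm (row : List (Option String)) (c : Nat) : String :=
  match row[c]? with
  | some cell => pvNorm cell
  | none => ""

-- f"{positions}" for a Python list of ints
def pvFmtPos (ps : List Int) : String :=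
  "[" ++ String.intercalate ", " (ps.map PySem.Int.toStr) ++ "]"

-- ===== PORT A =====
def detect_repetitive_patterns_py (data : List (List (Option String))) : List String :=
  let patterns : List String := []
  let patterns :=
    if data.length > 3 then
      let row_patterns : PySem.Dict (List String) (List Int) :=
        (PySem.List.enumerate (data.drop 1) 1).foldl
          (fun d p =>
            let row_key := pvRowKey p.2
            if d.contains row_key then d.modify row_key [] (· ++ [p.1])
            else d.insert row_key [p.1])
          PySem.Dict.empty
      row_patterns.items.foldl
        (fun acc kp =>
          if kp.2.length > 1 then
            acc ++ ["Repeated row at positions " ++ pvFmtPos kp.2]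
          else acc)
        patterns
    else patterns
  -- `if len(data) > 0 and len(data[0]) > 3` (loop indices are Nats: range(len(data[0])))
  match data with
  | [] => patterns
  | first :: _ =>
    if first.length > 3 then
      (List.range first.length).foldl
        (fun acc c =>
          let col_values := data.map (fun row => pvColNorm row c)
          if PySem.Set.len (PySem.Set.ofList col_values) ≤ 2 ∧ col_values.length > 2 then
            acc ++ ["Column " ++ PySem.Int.toStr ((c : Int) + 1) ++ " has repetitive content"]
          else acc)
        patterns
    else patterns

-- ===== PORT B =====
-- `if len(t) < 3 and v not in t: t.append(v)` — the saturating per-column tracker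
def pvCapAdd (t : List String) (v : String) : List String :=
  if t.length < 3 ∧ v ∉ t then t ++ [v] else t

def detect_repetitive_patterns_py_alt (data : List (List (Option String))) : List String :=
  let patterns : List String := []
  let patterns :=
    if data.length > 3 then
      let keys := (data.drop 1).map pvRowKey
      -- `seen = set(); for key in keys: if key not in seen: …; seen.add(key)`
      (keys.foldl
        (fun (st : List String × PySem.Set (List String)) key =>
          if key ∈ st.2 then st
          else
            let positions :=
              ((PySem.List.enumerate keys 1).filter (fun p => p.2 == key)).map (·.1)
            let acc :=
              if positions.length > 1 then
                st.1 ++ ["Repeated row at positions " ++ pvFmtPos positions]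
              else st.1
            (acc, PySem.Set.add st.2 key))
        (patterns, PySem.Set.empty)).1
    else patterns
  match data with
  | [] => patterns
  | first :: _ =>
    if first.length > 3 then
      let ncols := first.length
      -- `for row in data: for c in range(ncols): …` mutating trackers[c] in place
      let trackers :=
        data.foldl
          (fun (ts : List (List String)) row =>
            ts.mapIdx (fun c t => pvCapAdd t (pvColNorm row c)))
          (List.replicate ncols [])
      (List.range ncols).foldl
        (fun acc c =>
          if (trackers.getD c []).length ≤ 2 ∧ data.length > 2 then
            acc ++ ["Column " ++ PySem.Int.toStr ((c : Int) + 1) ++ " has repetitive content"]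
          else acc)
        patterns
    else patterns

-- ===== PRECONDITION & SPEC =====
def Spec_detect_repetitive_patterns_py (data : List (List (Option String))) (out : List String) : Prop := out = detect_repetitive_patterns_py_alt data
instance (data : List (List (Option String))) (out : List String) : Decidable (Spec_detect_repetitive_patterns_py data out) := by unfold Spec_detect_repetitive_patterns_py; infer_instance

-- ===== CLAIM (what is proved, stated in full; the proofs are below) =====
def Claim_equal_detect_repetitive_patterns_py : Prop := ∀ (data : List (List (Option String))), Dom_detect_repetitive_patterns_py data → Spec_detect_repetitive_patterns_py data (detect_repetitive_patterns_py data)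

-- ===== LEMMAS AND PROOFS =====

theorem pv_enumerate_map {α β : Type} (f : α → β) (l : List α) (s : Int) :
    PySem.List.enumerate (l.map f) s = (PySem.List.enumerate l s).map (fun p => (p.1, f p.2)) := by
  induction l generalizing s with
  | nil => simp [PySem.List.enumerate_nil]
  | cons x xs ih => simp [PySem.List.enumerate_cons, ih]

theorem pv_len_filter_enum (xs : List (List String)) (k : List String) (s : Int) :
    ((PySem.List.enumerate xs s).filter (fun p => p.2 == k)).length = xs.count k := by
  induction xs generalizing s with
  | nil => simp [PySem.List.enumerate_nil]
  | cons x l ih =>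
      simp only [PySem.List.enumerate_cons, List.filter_cons, List.count_cons]
      by_cases h : x = k
      · simp [h, ih]
      · simp [h, ih]

-- A's row part, rewritten as a fold over the deduplicated keys
theorem pv_rowPart_eq (l : List (List (Option String))) (p0 : List String) :
    (((PySem.List.enumerate l 1).foldl
        (fun (d : PySem.Dict (List String) (List Int)) p =>
          let row_key := pvRowKey p.2
          if d.contains row_key then d.modify row_key [] (· ++ [p.1])
          else d.insert row_key [p.1])
        PySem.Dict.empty).items.foldl
      (fun acc kp =>
        if kp.2.length > 1 then
          acc ++ ["Repeated row at positions " ++ pvFmtPos kp.2]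
        else acc)
      p0)
    = (PySem.List.dedup (l.map pvRowKey)).foldl
        (fun acc key =>
          if PySem.List.count (l.map pvRowKey) key > 1 then
            acc ++ ["Repeated row at positions " ++
              pvFmtPos (((PySem.List.enumerate (l.map pvRowKey) 1).filter (fun p => p.2 == key)).map (·.1))]
          else acc)
        p0 := by
  have hstep : (fun (d : PySem.Dict (List String) (List Int)) (p : Int × List (Option String)) =>
        let row_key := pvRowKey p.2
        if d.contains row_key then d.modify row_key [] (· ++ [p.1]) else d.insert row_key [p.1])
      = fun d p => d.modify (pvRowKey p.2) [] (· ++ [p.1]) := by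
    funext d p
    by_cases h : d.contains (pvRowKey p.2) = true
    · simp [h]
    · simp only [Bool.not_eq_true] at h
      simp [h, PySem.Dict.modify, PySem.Dict.getD_of_not_contains (d := d) (h := h)]
  rw [hstep]
  set D := (PySem.List.enumerate l 1).foldl
      (fun (d : PySem.Dict (List String) (List Int)) p => d.modify (pvRowKey p.2) [] (· ++ [p.1]))
      PySem.Dict.empty with hD
  have hmapkeys : (PySem.List.enumerate l 1).map (fun p => pvRowKey p.2) = l.map pvRowKey := by
    rw [show (fun (p : Int × List (Option String)) => pvRowKey p.2) = pvRowKey ∘ (·.2) from rfl,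
      ← List.map_map, PySem.List.map_snd_enumerate]
  have hnodup : D.keys.Nodup := by
    exact PySem.Dict.nodup_keys_foldl_modify_key _ _ _ _ _ PySem.Dict.nodup_keys_empty
  have hkeys : D.keys = PySem.Set.ofList (l.map pvRowKey) := by
    rw [hD, PySem.Dict.keys_foldl_modify_key]
    simp [PySem.Dict.keys_empty, PySem.Set.update_nil_left, hmapkeys]
  have hgetD : ∀ k, D.getD k [] = ((PySem.List.enumerate l 1).filter (fun p => pvRowKey p.2 == k)).map (·.1) := by
    intro k
    rw [hD, show (PySem.List.enumerate l 1).foldl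
        (fun (d : PySem.Dict (List String) (List Int)) p => d.modify (pvRowKey p.2) [] (· ++ [p.1]))
        PySem.Dict.empty
      = (((PySem.List.enumerate l 1).map (fun p => (pvRowKey p.2, p.1))).foldl
        (fun (d : PySem.Dict (List String) (List Int)) q => d.modify q.1 [] (· ++ [q.2]))
        PySem.Dict.empty) by rw [List.foldl_map]]
    rw [PySem.Dict.getD_foldl_modify_append]
    simp [PySem.Dict.getD_empty, List.filter_map, List.map_map, Function.comp_def]
  have hpos : ∀ k : List String,
      ((PySem.List.enumerate (l.map pvRowKey) 1).filter (fun p => p.2 == k)).map (·.1)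
        = ((PySem.List.enumerate l 1).filter (fun p => pvRowKey p.2 == k)).map (·.1) := by
    intro k
    rw [pv_enumerate_map]
    simp [List.filter_map, List.map_map, Function.comp_def]
  rw [PySem.Dict.items_eq_map_keys D hnodup [], List.foldl_map, hkeys]
  simp only [PySem.List.dedup_eq_ofList]
  apply PySem.List.foldl_congr_mem
  intro acc k _
  simp only [hgetD k, ← hpos k, List.length_map, pv_len_filter_enum, PySem.List.count_eq]
  rfl

-- Set.update keeps its first argument as a prefix
theorem pv_update_take (l s : List (List String)) :
    (PySem.Set.update s l).take s.length = s := by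
  induction l generalizing s with
  | nil => simp [PySem.Set.update]
  | cons k l ih =>
      rw [PySem.Set.update_cons]
      by_cases h : k ∈ s
      · rw [show PySem.Set.add s k = s by simp [PySem.Set.add, h]]
        exact ih s
      · have ha : PySem.Set.add s k = s ++ [k] := by simp [PySem.Set.add, h]
        rw [ha]
        calc (PySem.Set.update (s ++ [k]) l).take s.length
            = ((PySem.Set.update (s ++ [k]) l).take (s ++ [k]).length).take s.length := by
              rw [List.take_take, Nat.min_eq_left (by simp)]
          _ = (s ++ [k]).take s.length := by rw [ih (s ++ [k])]
          _ = s := by rw [List.take_append_of_le_length (by simp), List.take_length]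

-- B's 'seen'-set fold emits exactly once per first occurrence, in order
theorem pv_seen_fold (E : List String → List String → List String)
    (l : List (List String)) (p0 : List String) (s : PySem.Set (List String)) :
    (l.foldl
      (fun (st : List String × PySem.Set (List String)) key =>
        if key ∈ st.2 then st else (E st.1 key, PySem.Set.add st.2 key))
      (p0, s)).1
    = ((PySem.Set.update s l).drop s.length).foldl E p0 := by
  induction l generalizing p0 s with
  | nil => simp [PySem.Set.update]
  | cons k l ih =>
      rw [List.foldl_cons, PySem.Set.update_cons]
      by_cases h : k ∈ s
      · rw [if_pos h, show PySem.Set.add s k = s by simp [PySem.Set.add, h]]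
        exact ih p0 s
      · rw [if_neg h]
        have ha : PySem.Set.add s k = s ++ [k] := by simp [PySem.Set.add, h]
        rw [ha, ih (E p0 k) (s ++ [k])]
        have hdecomp := (List.take_append_drop (s ++ [k]).length (PySem.Set.update (s ++ [k]) l)).symm
        rw [pv_update_take l (s ++ [k])] at hdecomp
        rw [show (PySem.Set.update (s ++ [k]) l).drop s.length
            = k :: (PySem.Set.update (s ++ [k]) l).drop (s ++ [k]).length by
          conv_lhs => rw [hdecomp]
          rw [List.append_assoc, List.drop_left]
          rfl]
        rfl

-- one saturating-tracker step agrees with dedup-then-take-3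
theorem pv_cap_step (ws : List String) (v : String) :
    pvCapAdd ((PySem.Set.ofList ws).take 3) v = (PySem.Set.ofList (ws ++ [v])).take 3 := by
  rw [PySem.Set.ofList_append_singleton]
  by_cases h : v ∈ PySem.Set.ofList ws
  · rw [show PySem.Set.add (PySem.Set.ofList ws) v = PySem.Set.ofList ws by
      simp [PySem.Set.add, h]]
    by_cases ht : v ∈ (PySem.Set.ofList ws).take 3
    · simp [pvCapAdd, ht]
    · have hlen : ((PySem.Set.ofList ws).take 3).length = 3 := by
        rw [List.length_take]
        rcases Nat.lt_or_ge (PySem.Set.ofList ws).length 3 with hl | hl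
        · exact absurd (by rw [List.take_of_length_le (Nat.le_of_lt hl)]; exact h) ht
        · omega
      simp [pvCapAdd, hlen]
  · have ha : PySem.Set.add (PySem.Set.ofList ws) v = PySem.Set.ofList ws ++ [v] := by
      simp [PySem.Set.add, h]
    rw [ha]
    by_cases hl : (PySem.Set.ofList ws).length < 3
    · have ht : (PySem.Set.ofList ws).take 3 = PySem.Set.ofList ws :=
        List.take_of_length_le (Nat.le_of_lt hl)
      rw [ht, show pvCapAdd (PySem.Set.ofList ws) v = PySem.Set.ofList ws ++ [v] from by
        simp [pvCapAdd, hl, h]]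
      exact (List.take_of_length_le (by simp; omega)).symm
    · have hsub : v ∉ (PySem.Set.ofList ws).take 3 := fun hm => h (List.mem_of_mem_take hm)
      have hlen : ((PySem.Set.ofList ws).take 3).length = 3 := by
        rw [List.length_take]; omega
      simp only [pvCapAdd, hlen]
      rw [if_neg (by omega), List.take_append_of_le_length (by omega)]

theorem pv_cap_fold (vs ws : List String) :
    vs.foldl pvCapAdd ((PySem.Set.ofList ws).take 3) = (PySem.Set.ofList (ws ++ vs)).take 3 := by
  induction vs generalizing ws with
  | nil => simp
  | cons v vs ih =>
      rw [List.foldl_cons, pv_cap_step, ih (ws ++ [v]), List.append_assoc]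
      rfl

theorem pv_colFold_getElem? (data : List (List (Option String)))
    (ss : List (List String)) (c : Nat) :
    (data.foldl
      (fun (ts : List (List String)) row =>
        ts.mapIdx (fun c t => pvCapAdd t (pvColNorm row c)))
      ss)[c]?
    = ss[c]?.map (fun t => (data.map (fun row => pvColNorm row c)).foldl pvCapAdd t) := by
  induction data generalizing ss with
  | nil => simp
  | cons r rs ih =>
      simp only [List.foldl_cons, ih, List.getElem?_mapIdx, List.map_cons]
      cases ss[c]? <;> simp

-- B's column part equals A's column part (for any accumulated prefix p0)
theorem pv_colPart_eq (first : List (Option String)) (rest : List (List (Option String)))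
    (p0 : List String) :
    (if first.length > 3 then
      (List.range first.length).foldl
        (fun acc c =>
          let col_values := (first :: rest).map (fun row => pvColNorm row c)
          if PySem.Set.len (PySem.Set.ofList col_values) ≤ 2 ∧ col_values.length > 2 then
            acc ++ ["Column " ++ PySem.Int.toStr ((c : Int) + 1) ++ " has repetitive content"]
          else acc)
        p0
    else p0)
    = (if first.length > 3 then
      (List.range first.length).foldl
        (fun acc c =>
          if (((first :: rest).foldl
              (fun (ts : List (List String)) row =>
                ts.mapIdx (fun c t => pvCapAdd t (pvColNorm row c)))
              (List.replicate first.length [])).getD c []).length ≤ 2 ∧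
              (first :: rest).length > 2 then
            acc ++ ["Column " ++ PySem.Int.toStr ((c : Int) + 1) ++ " has repetitive content"]
          else acc)
        p0
    else p0) := by
  by_cases hc : first.length > 3
  · simp only [if_pos hc]
    apply PySem.List.foldl_congr_mem
    intro acc c hcmem
    have hclt : c < first.length := List.mem_range.mp hcmem
    have htr : (((first :: rest).foldl
        (fun (ts : List (List String)) row =>
          ts.mapIdx (fun c t => pvCapAdd t (pvColNorm row c)))
        (List.replicate first.length [])).getD c [])
        = (PySem.Set.ofList ((first :: rest).map (fun row => pvColNorm row c))).take 3 := by
      rw [List.getD_eq_getElem?_getD, pv_colFold_getElem?, List.getElem?_replicate]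
      rw [if_pos hclt]
      simp only [Option.map_some, Option.getD_some]
      have := pv_cap_fold ((first :: rest).map (fun row => pvColNorm row c)) []
      simpa using this
    have hiff : ((((first :: rest).foldl
        (fun (ts : List (List String)) row =>
          ts.mapIdx (fun c t => pvCapAdd t (pvColNorm row c)))
        (List.replicate first.length [])).getD c []).length ≤ 2 ∧
        (first :: rest).length > 2)
        ↔ (PySem.Set.len (PySem.Set.ofList ((first :: rest).map (fun row => pvColNorm row c))) ≤ 2 ∧
            ((first :: rest).map (fun row => pvColNorm row c)).length > 2) := by
      rw [htr, List.length_take, PySem.Set.len, List.length_map]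
      constructor
      · rintro ⟨h1, h2⟩; exact ⟨by omega, h2⟩
      · rintro ⟨h1, h2⟩; exact ⟨by omega, h2⟩
    simp only [hiff]
  · simp only [if_neg hc]

-- ===== VERDICT (by name: the statement is the Claim_ definition above) =====
theorem detect_repetitive_patterns_py_spec : Claim_equal_detect_repetitive_patterns_py := by
  intro data _
  unfold Spec_detect_repetitive_patterns_py
  simp only [detect_repetitive_patterns_py, detect_repetitive_patterns_py_alt]
  rw [pv_rowPart_eq]
  have hrow : ∀ p0 : List String,
      (((data.drop 1).map pvRowKey).foldl
        (fun (st : List String × PySem.Set (List String)) key =>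
          if key ∈ st.2 then st
          else
            (if (((PySem.List.enumerate ((data.drop 1).map pvRowKey) 1).filter
                  (fun p => p.2 == key)).map (·.1)).length > 1 then
              st.1 ++ ["Repeated row at positions " ++
                pvFmtPos (((PySem.List.enumerate ((data.drop 1).map pvRowKey) 1).filter
                  (fun p => p.2 == key)).map (·.1))]
            else st.1, PySem.Set.add st.2 key))
        (p0, PySem.Set.empty)).1
      = (PySem.List.dedup ((data.drop 1).map pvRowKey)).foldl
          (fun acc key =>
            if PySem.List.count ((data.drop 1).map pvRowKey) key > 1 then
              acc ++ ["Repeated row at positions " ++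
                pvFmtPos (((PySem.List.enumerate ((data.drop 1).map pvRowKey) 1).filter
                  (fun p => p.2 == key)).map (·.1))]
            else acc)
          p0 := by
    intro p0
    rw [pv_seen_fold (fun acc key =>
          if (((PySem.List.enumerate ((data.drop 1).map pvRowKey) 1).filter
                (fun p => p.2 == key)).map (·.1)).length > 1 then
            acc ++ ["Repeated row at positions " ++
              pvFmtPos (((PySem.List.enumerate ((data.drop 1).map pvRowKey) 1).filter
                (fun p => p.2 == key)).map (·.1))]
          else acc)]
    simp only [PySem.Set.empty, PySem.Set.update_nil_left, List.length_nil, List.drop_zero,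
      PySem.List.dedup_eq_ofList]
    apply PySem.List.foldl_congr_mem
    intro acc k _
    simp only [List.length_map, pv_len_filter_enum, PySem.List.count_eq]
    rfl
  cases data with
  | nil => simp
  | cons first rest =>
      by_cases h4 : (first :: rest).length > 3
      · simp only [if_pos h4, hrow]
        exact pv_colPart_eq first rest _
      · simp only [if_neg h4]
        exact pv_colPart_eq first rest _
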